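-- pv_equiv track=rewrite | github.com/gajinote/pipitan | make3gram.py | output_target
-- ===== SOURCE A (Python) =====
-- def output_target(target):
--   i = 0
--   ret_list=[]
--   output=target
--   s = len(target)
--   while(i+2 < s):
--       if (output[i] != "\n" and output[i+1] != "\n" and output[i+2] !="\n"):
--           ret_list.append(output[i]+output[i+1]+output[i+2])
--       i += 1
--   return ret_list
-- ===== SOURCE B (Python) =====
-- def output_target(target):
--     ret_list = []
--     for seg in target.split('\n'):
--         for j in range(len(seg) - 2):
--             ret_list.append(seg[j:j+3])
--     return ret_list
-- ===== Notes on version B (the rewrite author's own statement) =====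
-- stated objective: faster
-- what changed: split-then-slide: B splits the string on newlines once and takes every width-3 slice inside each segment, instead of A's index loop that re-checks three characters for newline at every position.
import Mathlib
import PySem

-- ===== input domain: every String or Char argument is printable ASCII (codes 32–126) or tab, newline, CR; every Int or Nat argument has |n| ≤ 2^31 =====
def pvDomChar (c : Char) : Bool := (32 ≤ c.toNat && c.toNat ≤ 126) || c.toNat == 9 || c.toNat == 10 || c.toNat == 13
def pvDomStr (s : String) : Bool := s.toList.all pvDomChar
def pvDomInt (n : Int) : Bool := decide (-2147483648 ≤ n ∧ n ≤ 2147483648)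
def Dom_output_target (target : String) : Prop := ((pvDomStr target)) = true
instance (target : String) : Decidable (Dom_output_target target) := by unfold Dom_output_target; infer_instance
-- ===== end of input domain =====

-- B lists the newline-free trigrams by splitting the string on '\n' once and slicing every
-- width-3 window inside each segment, instead of A's per-index triple newline check (alternative decomposition).

-- ===== PORT A =====
-- A's while loop; the Nat argument is fuel that only guards termination (it is never exhausted)
def outputLoop (output : String) (s : Int) (i : Int) (retList : List String) : Nat → List String
  | 0 => retList
  | fuel + 1 =>
    if i + 2 < s then
      let retList :=
        match PySem.Str.pyGet? output i, PySem.Str.pyGet? output (i + 1),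
              PySem.Str.pyGet? output (i + 2) with
        | some a, some b, some c =>
          if a ≠ '\n' ∧ b ≠ '\n' ∧ c ≠ '\n' then retList ++ [String.ofList [a, b, c]] else retList
        | _, _, _ => retList
      outputLoop output s (i + 1) retList fuel
    else retList

def output_target (target : String) : List String :=
  outputLoop target (PySem.Str.len target) 0 [] target.toList.length

-- ===== PORT B =====
def output_target_alt (target : String) : List String :=
  match PySem.Str.split? target "\n" with
  | none => []
  | some segs =>
    segs.foldl (fun retList seg =>
      (PySem.List.pyRange 0 (PySem.Str.len seg - 2) 1).foldl
        (fun retList j => retList ++ [PySem.Str.slice seg (some j) (some (j + 3))]) retList) []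

-- ===== PRECONDITION & SPEC =====
def Spec_output_target (target : String) (out : List String) : Prop := out = output_target_alt target
instance (target : String) (out : List String) : Decidable (Spec_output_target target out) := by unfold Spec_output_target; infer_instance

-- ===== CLAIM (what is proved, stated in full; the proofs are below) =====
def Claim_equal_output_target : Prop := ∀ (target : String), Dom_output_target target → Spec_output_target target (output_target target)

-- ===== LEMMAS AND PROOFS =====

-- the guarded trigram list A computes, as structural recursion on the character list
def tris : List Char → List String
  | a :: b :: c :: rest =>
    (if a ≠ '\n' ∧ b ≠ '\n' ∧ c ≠ '\n' then [String.ofList [a, b, c]] else []) ++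
      tris (b :: c :: rest)
  | _ => []

def wins : List Char → List String
  | a :: b :: c :: rest => String.ofList [a, b, c] :: wins (b :: c :: rest)
  | _ => []

def splitNL (cur : List Char) : List Char → List (List Char)
  | [] => [cur.reverse]
  | c :: rest => if c = '\n' then cur.reverse :: splitNL [] rest else splitNL (c :: cur) rest

theorem tris_short (l : List Char) (h : l.length ≤ 2) : tris l = [] := by
  match l with
  | [] => rfl
  | [a] => rfl
  | [a, b] => rfl
  | a :: b :: c :: r => simp at h

theorem tris_nl (l : List Char) : tris ('\n' :: l) = tris l := by
  match l with
  | [] => rfl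
  | [c] => rfl
  | c :: d :: r => simp [tris]

theorem wins_eq_tris (l : List Char) (h : '\n' ∉ l) : wins l = tris l := by
  induction l with
  | nil => rfl
  | cons a t ih =>
    match t with
    | [] => rfl
    | [b] => rfl
    | b :: c :: r =>
      simp only [List.mem_cons, not_or] at h
      have ha : a ≠ '\n' := fun e => h.1 e.symm
      have hb : b ≠ '\n' := fun e => h.2.1 e.symm
      have hc : c ≠ '\n' := fun e => h.2.2.1 e.symm
      simp [wins, tris, ha, hb, hc, ih (by simp [List.mem_cons, not_or]; exact ⟨h.2.1, h.2.2.1, fun e => (h.2.2.2 (by simp [e]))⟩)]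

theorem tris_append_nl (pre rest : List Char) (h : '\n' ∉ pre) :
    tris (pre ++ '\n' :: rest) = wins pre ++ tris rest := by
  induction pre with
  | nil => simpa [wins] using tris_nl rest
  | cons a t ih =>
    simp only [List.mem_cons, not_or] at h
    have ha : a ≠ '\n' := fun e => h.1 e.symm
    match t with
    | [] =>
      match rest with
      | [] => simp [tris, wins]
      | d :: r => simp [tris, wins, tris_nl]
    | [b] =>
      have hb : b ≠ '\n' := fun e => h.2 (by simp [e])
      have ihb := ih (by simp; exact fun e => hb e.symm)
      simp only [List.cons_append, List.nil_append] at ihb ⊢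
      simp [tris, wins, ihb]
    | b :: c :: t' =>
      simp only [List.mem_cons, not_or] at h
      have hb : b ≠ '\n' := fun e => h.2.1 e.symm
      have hc : c ≠ '\n' := fun e => h.2.2.1 e.symm
      have iht := ih (by simp [List.mem_cons, not_or]; exact ⟨h.2.1, h.2.2.1, fun e => h.2.2.2 (by simp [e])⟩)
      simp only [List.cons_append] at iht ⊢
      simp [tris, wins, ha, hb, hc, iht]

theorem splitNL_flatMap (cs : List Char) (cur : List Char) (h : '\n' ∉ cur) :
    (splitNL cur cs).flatMap wins = tris (cur.reverse ++ cs) := by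
  induction cs generalizing cur with
  | nil =>
    simp [splitNL, wins_eq_tris cur.reverse (by simpa using h)]
  | cons c rest ih =>
    by_cases hc : c = '\n'
    · subst hc
      simp [splitNL, ih [] (by simp), tris_append_nl cur.reverse rest (by simpa using h)]
    · have := ih (c :: cur) (by simp [h]; exact fun e => hc e.symm)
      simpa [splitNL, hc] using this

theorem splitOn_go_eq (l : List Char) (fuel : Nat) (cur : List Char) (acc : List (List Char))
    (h : l.length < fuel) :
    PySem.Chars.splitOn.go ['\n'] fuel l cur acc = acc.reverse ++ splitNL cur l := by
  induction l generalizing fuel cur acc with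
  | nil =>
    match fuel, h with
    | f + 1, _ => simp [PySem.Chars.splitOn.go, splitNL]
  | cons c rest ih =>
    match fuel, h with
    | f + 1, h =>
      rw [PySem.Chars.splitOn.go.eq_def]
      simp only []
      by_cases hc : c = '\n'
      · subst hc
        simp only [List.isPrefixOf, BEq.rfl, Bool.true_and, if_pos,
          List.length_singleton, List.drop_one, List.tail_cons]
        rw [ih f [] (cur.reverse :: acc) (by simpa using Nat.lt_of_succ_lt_succ (by simpa using h))]
        simp [splitNL]
      · have hp : ['\n'].isPrefixOf (c :: rest) = false := by
          simp [List.isPrefixOf]; exact fun e => hc e.symm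
        simp only [hp, Bool.false_eq_true, if_false]
        rw [ih f (c :: cur) acc (by simpa using Nat.lt_of_succ_lt_succ (by simpa using h))]
        simp [splitNL, hc]

theorem splitOn_eq (cs : List Char) : PySem.Chars.splitOn cs ['\n'] = splitNL [] cs := by
  rw [PySem.Chars.splitOn, splitOn_go_eq cs (cs.length + 1) [] [] (by omega)]
  simp

theorem map_slice_eq_wins (cs : List Char) :
    (PySem.List.pyRange 0 ((cs.length : Int) - 2) 1).map
      (fun j => String.ofList (PySem.List.slice cs (some j) (some (j + 3)))) = wins cs := by
  induction cs with
  | nil => simp [PySem.List.pyRange_one_eq_nil, wins]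
  | cons a t ih =>
    match t with
    | [] => simp [PySem.List.pyRange_one_eq_nil, wins]
    | [b] => simp [PySem.List.pyRange_one_eq_nil, wins]
    | b :: c :: r =>
      have hlen : ((a :: b :: c :: r).length : Int) - 2 = (r.length : Int) + 1 := by
        simp; omega
      rw [hlen, PySem.List.pyRange_one_cons (by positivity)]
      simp only [List.map_cons]
      have h0 : PySem.List.slice (a :: b :: c :: r) (some 0) (some (0 + 3)) = [a, b, c] := by
        have := PySem.List.slice_natCast (xs := a :: b :: c :: r) (a := 0) (b := 3)
        simpa using this
      rw [h0]
      have htail : (PySem.List.pyRange 1 ((r.length : Int) + 1) 1).map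
          (fun j => String.ofList (PySem.List.slice (a :: b :: c :: r) (some j) (some (j + 3))))
          = (PySem.List.pyRange 0 ((r.length : Int)) 1).map
          (fun j => String.ofList (PySem.List.slice (b :: c :: r) (some j) (some (j + 3)))) := by
        rw [PySem.List.pyRange_one 1, PySem.List.pyRange_one 0]
        simp only [List.map_map]
        norm_num
        intro k hk
        congr 1
        have e1 : (1 : Int) + (k : Int) = ((k + 1 : Nat) : Int) := by push_cast; ring
        rw [e1]
        have e2 : ((k + 1 : Nat) : Int) + 3 = ((k + 4 : Nat) : Int) := by push_cast; ring
        rw [e2]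
        have e4 : (k : Int) + 3 = ((k + 3 : Nat) : Int) := by push_cast; ring
        rw [e4, PySem.List.slice_natCast, PySem.List.slice_natCast]
        simp only [List.drop_succ_cons]
        congr 1
        omega
      have hb : ((b :: c :: r).length : Int) - 2 = (r.length : Int) := by simp; omega
      simp only [zero_add]
      rw [htail]
      rw [hb] at ih
      rw [ih, wins]

theorem loop_spec (target : String) (fuel : Nat) (i : Nat) (ret : List String)
    (h : target.toList.length ≤ fuel + i) :
    outputLoop target ((target.toList.length : Int)) (i : Int) ret fuel
      = ret ++ tris (target.toList.drop i) := by
  induction fuel generalizing i ret with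
  | zero =>
    rw [outputLoop, tris_short _ (by simp only [List.length_drop]; omega), List.append_nil]
  | succ f ih =>
    rw [outputLoop]
    by_cases hc : (i : Int) + 2 < (target.toList.length : Int)
    · rw [if_pos hc]
      have hi2 : i + 2 < target.toList.length := by exact_mod_cast hc
      have h0 : i < target.toList.length := by omega
      have h1 : i + 1 < target.toList.length := by omega
      have g0 : PySem.Str.pyGet? target (i : Int) = some (target.toList[i]) := by
        rw [PySem.Str.pyGet?_eq, PySem.Chars.pyGet?_eq_listPyGet?, PySem.List.pyGet?_natCast, List.getElem?_eq_getElem h0]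
      have g1 : PySem.Str.pyGet? target ((i : Int) + 1) = some (target.toList[i+1]) := by
        have e : (i : Int) + 1 = ((i + 1 : Nat) : Int) := by push_cast; ring
        rw [PySem.Str.pyGet?_eq, PySem.Chars.pyGet?_eq_listPyGet?, e, PySem.List.pyGet?_natCast, List.getElem?_eq_getElem h1]
      have g2 : PySem.Str.pyGet? target ((i : Int) + 2) = some (target.toList[i+2]) := by
        have e : (i : Int) + 2 = ((i + 2 : Nat) : Int) := by push_cast; ring
        rw [PySem.Str.pyGet?_eq, PySem.Chars.pyGet?_eq_listPyGet?, e, PySem.List.pyGet?_natCast, List.getElem?_eq_getElem hi2]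
      rw [g0, g1, g2]
      dsimp only
      have e1 : (i : Int) + 1 = ((i + 1 : Nat) : Int) := by push_cast; ring
      rw [e1, ih (i + 1) _ (by omega)]
      have hd : target.toList.drop i =
          target.toList[i] :: target.toList[i+1] :: target.toList[i+2] :: target.toList.drop (i+3) := by
        rw [List.drop_eq_getElem_cons h0, List.drop_eq_getElem_cons h1, List.drop_eq_getElem_cons hi2]
      have hd1 : target.toList.drop (i+1) =
          target.toList[i+1] :: target.toList[i+2] :: target.toList.drop (i+3) := by
        rw [List.drop_eq_getElem_cons h1, List.drop_eq_getElem_cons hi2]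
      rw [hd, tris, ← hd1]
      by_cases hx : target.toList[i] ≠ '\n' ∧ target.toList[i+1] ≠ '\n' ∧ target.toList[i+2] ≠ '\n'
      · rw [if_pos hx, if_pos hx, List.append_assoc]
      · rw [if_neg hx, if_neg hx, List.nil_append]
    · rw [if_neg hc, tris_short _ (by simp only [List.length_drop]; omega), List.append_nil]

theorem str_slice_eq (s : String) (a? b? : Option Int) :
    PySem.Str.slice s a? b? = String.ofList (PySem.List.slice s.toList a? b?) := by
  have h := congrArg String.ofList (PySem.Str.toList_slice s a? b?)
  rw [String.ofList_toList] at h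
  rw [h, PySem.Chars.slice_eq_listSlice]

theorem inner_fold (seg : String) (acc : List String) :
    (PySem.List.pyRange 0 (PySem.Str.len seg - 2) 1).foldl
      (fun r j => r ++ [PySem.Str.slice seg (some j) (some (j + 3))]) acc
      = acc ++ wins seg.toList := by
  rw [PySem.List.foldl_append_singleton_eq_map]
  congr 1
  rw [PySem.Str.len_eq, ← map_slice_eq_wins seg.toList]
  apply List.map_congr_left
  intro j hj
  rw [str_slice_eq]

theorem fold_segs (segs : List String) (acc : List String) :
    segs.foldl (fun retList seg =>
      (PySem.List.pyRange 0 (PySem.Str.len seg - 2) 1).foldl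
        (fun retList j => retList ++ [PySem.Str.slice seg (some j) (some (j + 3))]) retList) acc
      = acc ++ segs.flatMap (fun seg => wins seg.toList) := by
  induction segs generalizing acc with
  | nil => simp
  | cons s rest ih =>
    rw [List.foldl_cons, inner_fold, ih, List.flatMap_cons, List.append_assoc]

theorem alt_eq (target : String) : output_target_alt target = tris target.toList := by
  have hsegs : PySem.Str.split? target "\n"
      = some ((splitNL [] target.toList).map String.ofList) := by
    rw [PySem.Str.split?]
    have h1 : ("\n" : String).toList = ['\n'] := rfl
    rw [h1, PySem.Chars.split?]
    simp [splitOn_eq]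
  rw [output_target_alt, hsegs]
  dsimp only
  rw [fold_segs, List.nil_append, List.flatMap_map]
  simp only [String.toList_ofList]
  rw [splitNL_flatMap target.toList [] (by simp)]
  simp

theorem a_eq (target : String) : output_target target = tris target.toList := by
  rw [output_target, PySem.Str.len_eq]
  have := loop_spec target target.toList.length 0 [] (by omega)
  simpa using this

-- ===== VERDICT (by name: the statement is the Claim_ definition above) =====
theorem output_target_spec : Claim_equal_output_target := by
  intro target _
  unfold Spec_output_target
  rw [a_eq, alt_eq]
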